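-- pv_equiv track=rewrite | github.com/philippmstecher-code/RDT | src/tiny_imagenet_hierarchy.py | get_superclass_groups
-- ===== SOURCE A (Python) =====
-- from typing import Dict, List
--
-- def get_superclass_groups(
--     superclass_map: Dict[int, str],
-- ) -> Dict[str, List[int]]:
--     """Group class indices by their superclass."""
--     groups: Dict[str, List[int]] = {}
--     for class_idx, superclass_name in superclass_map.items():
--         groups.setdefault(superclass_name, []).append(class_idx)
--     for key in groups:
--         groups[key].sort()
--     return groups
-- ===== SOURCE B (Python) =====
-- from typing import Dict, List
--
--
-- def get_superclass_groups(
--     superclass_map: Dict[int, str],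
-- ) -> Dict[str, List[int]]:
--     """Group class indices by their superclass."""
--     order = list(dict.fromkeys(superclass_map.values()))
--     idxs = sorted(superclass_map)
--     return {name: [i for i in idxs if superclass_map[i] == name] for name in order}
-- ===== Notes on version B (the rewrite author's own statement) =====
-- stated objective: alternative
-- what changed: Instead of appending into buckets and then sorting every bucket, B sorts the key list once and builds each superclass group by filtering the sorted keys per name, so no per-bucket sort remains.
import Mathlib
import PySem

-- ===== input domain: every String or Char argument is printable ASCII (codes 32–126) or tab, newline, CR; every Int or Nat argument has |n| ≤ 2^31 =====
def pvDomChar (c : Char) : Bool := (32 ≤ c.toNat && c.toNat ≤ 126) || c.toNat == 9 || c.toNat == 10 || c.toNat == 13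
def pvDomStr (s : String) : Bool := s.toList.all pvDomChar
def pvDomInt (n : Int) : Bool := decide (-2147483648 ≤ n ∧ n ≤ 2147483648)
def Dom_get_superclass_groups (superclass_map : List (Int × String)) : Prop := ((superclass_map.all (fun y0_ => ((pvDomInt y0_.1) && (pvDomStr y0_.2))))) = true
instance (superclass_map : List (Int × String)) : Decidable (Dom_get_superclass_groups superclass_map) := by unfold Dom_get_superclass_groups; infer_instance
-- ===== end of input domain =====

-- B replaces A's "append into buckets, then sort every bucket" by one sort of the key list
-- followed by a per-name filter of that sorted list (objective: alternative decomposition).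


-- ===== PORT A =====
-- groups: Dict[str, List[int]]; setdefault(name, []).append(idx) ≡ modify name [] (· ++ [idx]);
-- the second loop sorts each bucket in place (key order unchanged); the dict is returned as its items list.
def get_superclass_groups (superclass_map : List (Int × String)) : List (String × List Int) :=
  (superclass_map.foldl
      (fun (g : PySem.Dict String (List Int)) p => g.modify p.2 [] (fun l => l ++ [p.1]))
      PySem.Dict.empty).items.map
    (fun q => (q.1, PySem.List.sorted q.2 (fun x => x) false))

-- ===== PORT B =====
-- order = list(dict.fromkeys(values)); idxs = sorted(keys);
-- {name: [i for i in idxs if superclass_map[i] == name] for name in order}.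
-- superclass_map[i] is ported with .getD "" — exact here since every i in idxs is a key of the map.
def get_superclass_groups_alt (superclass_map : List (Int × String)) : List (String × List Int) :=
  (PySem.List.dedup (superclass_map.map (fun p => p.2))).map (fun name =>
    (name, (PySem.List.sorted (superclass_map.map (fun p => p.1)) (fun x => x) false).filter
      (fun i => ((PySem.Dict.mk superclass_map).get? i).getD "" == name)))

-- ===== PRECONDITION & SPEC =====
-- Pre_ excludes association lists with duplicate integer keys: they do not represent any Python
-- dict (A's parameter type), so no Python input is excluded.
def Pre_get_superclass_groups (superclass_map : List (Int × String)) : Prop :=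
  (superclass_map.map (fun p => p.1)).Nodup
instance (superclass_map : List (Int × String)) : Decidable (Pre_get_superclass_groups superclass_map) := by unfold Pre_get_superclass_groups; infer_instance
def pvWitness_get_superclass_groups : (List (Int × String)) := [(2, "b"), (0, "a"), (1, "b")]
def Spec_get_superclass_groups (superclass_map : List (Int × String)) (out : List (String × List Int)) : Prop := out = get_superclass_groups_alt superclass_map
instance (superclass_map : List (Int × String)) (out : List (String × List Int)) : Decidable (Spec_get_superclass_groups superclass_map out) := by unfold Spec_get_superclass_groups; infer_instance

-- ===== CLAIM (what is proved, stated in full; the proofs are below) =====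
def Claim_equal_get_superclass_groups : Prop := ∀ (superclass_map : List (Int × String)), Dom_get_superclass_groups superclass_map → Pre_get_superclass_groups superclass_map → Spec_get_superclass_groups superclass_map (get_superclass_groups superclass_map)


-- ===== LEMMAS AND PROOFS =====

-- On a map with distinct keys, looking up the key of an entry returns that entry's value.
theorem pv_lookup_of_mem (m : List (Int × String)) (p : Int × String)
    (hp : p ∈ m) (hnd : (m.map (fun p => p.1)).Nodup) :
    (PySem.Dict.mk m).get? p.1 = some p.2 := by
  apply PySem.Dict.get?_of_mem_items (d := PySem.Dict.mk m)
  · exact hp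
  · simpa [PySem.Dict.keys, PySem.Dict.items] using hnd

-- Per-name bucket equality: A's sorted bucket = B's filter of the sorted key list.
theorem pv_bucket (m : List (Int × String)) (nm : String)
    (hnd : (m.map (fun p => p.1)).Nodup) :
    PySem.List.sorted ((m.filter (fun p => p.2 == nm)).map (fun p => p.1)) (fun x => x) false
      = (PySem.List.sorted (m.map (fun p => p.1)) (fun x => x) false).filter
          (fun i => ((PySem.Dict.mk m).get? i).getD "" == nm) := by
  set q : Int → Bool := fun i => ((PySem.Dict.mk m).get? i).getD "" == nm with hq
  have hfilter : (m.map (fun p => p.1)).filter q = (m.filter (fun p => p.2 == nm)).map (fun p => p.1) := by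
    rw [List.filter_map]
    congr 1
    apply List.filter_congr
    intro p hp
    simp [hq, Function.comp, pv_lookup_of_mem m p hp hnd]
  have hperm : ((PySem.List.sorted (m.map (fun p => p.1)) (fun x => x) false).filter q).Perm
      ((m.filter (fun p => p.2 == nm)).map (fun p => p.1)) := by
    rw [← hfilter]
    exact (PySem.List.sorted_perm _ _ _).filter q
  have hpw : ((PySem.List.sorted (m.map (fun p => p.1)) (fun x => x) false).filter q).Pairwise
      (fun a b => (fun x => (x : Int)) a < (fun x => x) b) := by
    have hle := PySem.List.sorted_pairwise (xs := m.map (fun p => p.1)) (key := fun x => x)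
    have hnd' : (PySem.List.sorted (m.map (fun p => p.1)) (fun x => x) false).Nodup :=
      (PySem.List.sorted_perm _ _ _).nodup_iff.mpr hnd
    have hlt : (PySem.List.sorted (m.map (fun p => p.1)) (fun x => x) false).Pairwise
        (fun a b => a < b) := (hle.and hnd').imp (fun {a b} h => lt_of_le_of_ne h.1 h.2)
    exact hlt.filter q
  exact PySem.List.sorted_eq_of_perm_of_pairwise_lt _ _ _ hperm hpw

-- ===== VERDICT (by name: the statement is the Claim_ definition above) =====
theorem get_superclass_groups_spec : Claim_equal_get_superclass_groups := by
  intro m _ hnd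
  unfold Spec_get_superclass_groups get_superclass_groups get_superclass_groups_alt
  -- rewrite A's fold over pairs as a fold over the swapped pairs, to use the grouping lemmas
  have hsw : m.foldl (fun (g : PySem.Dict String (List Int)) p => g.modify p.2 [] (fun l => l ++ [p.1])) PySem.Dict.empty
      = (m.map (fun p => (p.2, p.1))).foldl (fun g p => g.modify p.1 [] (fun l => l ++ [p.2])) PySem.Dict.empty := by
    rw [List.foldl_map]
  rw [hsw]
  set sw := m.map (fun p => ((p.2 : String), (p.1 : Int))) with hswdef
  set G := sw.foldl (fun (g : PySem.Dict String (List Int)) p => g.modify p.1 [] (fun l => l ++ [p.2])) PySem.Dict.empty with hG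
  have hndk : G.keys.Nodup := by
    rw [hG]
    exact PySem.Dict.nodup_keys_foldl_modify_key sw (fun p => p.1) [] (fun _ p l => l ++ [p.2]) PySem.Dict.empty PySem.Dict.nodup_keys_empty
  have hkeys : G.keys = PySem.List.dedup (m.map (fun p => p.2)) := by
    rw [hG, PySem.Dict.keys_foldl_modify_key sw (fun p => p.1) [] (fun _ p l => l ++ [p.2])]
    simp [PySem.Set.update, PySem.Dict.keys_empty, hswdef, List.map_map, Function.comp_def,
      PySem.List.dedup_eq_ofList, PySem.Set.ofList_eq_foldl]
  rw [PySem.Dict.items_eq_map_keys G hndk [], hkeys, List.map_map]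
  apply List.map_congr_left
  intro nm _
  simp only [Function.comp]
  have hgetD : G.getD nm [] = (sw.filter (fun p => p.1 == nm)).map (fun p => p.2) := by
    rw [hG]
    simpa [PySem.Dict.getD_empty] using
      (PySem.Dict.getD_foldl_modify_append sw PySem.Dict.empty nm)
  have hswf : (sw.filter (fun p => p.1 == nm)).map (fun p => p.2)
      = (m.filter (fun p => p.2 == nm)).map (fun p => p.1) := by
    rw [hswdef, List.filter_map, List.map_map]
    simp [Function.comp_def]
  rw [hgetD, hswf, pv_bucket m nm hnd]
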